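-- pv_equiv track=rewrite | github.com/xthemadgenius/rain-papa | property_results_extractor.py | _create_column_mapping
-- ===== SOURCE A (Python) =====
-- from typing import List, Dict, Optional, Tuple
--
-- def _create_column_mapping(headers: List[str]) -> Dict[int, str]:
--     """Create mapping from column index to PropertyRecord field"""
--     mapping = {}
--
--     field_keywords = {
--         'property_address': ['address', 'location', 'street', 'property location'],
--         'owner_name': ['owner', 'name', 'taxpayer'],
--         'property_value': ['value', 'assessment', 'assessed', 'appraised', 'market value'],
--         'square_footage': ['sqft', 'sq ft', 'square', 'footage', 'area', 'size'],
--         'parcel_id': ['parcel', 'id', 'account', 'number', 'pcn'],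
--         'sale_price': ['sale', 'sold', 'price', 'amount'],
--         'sale_date': ['date', 'sold date', 'sale date'],
--         'year_built': ['year built', 'built', 'construction'],
--         'property_type': ['type', 'use', 'classification'],
--         'municipality': ['city', 'municipality', 'jurisdiction'],
--         'lot_size': ['lot', 'land', 'acreage'],
--         'bedrooms': ['bed', 'br', 'bedroom'],
--         'bathrooms': ['bath', 'bathroom', 'ba'],
--         'zoning': ['zone', 'zoning']
--     }
--
--     for col_idx, header in enumerate(headers):
--         header_lower = header.lower()
--         for field, keywords in field_keywords.items():
--             if any(keyword in header_lower for keyword in keywords):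
--                 mapping[col_idx] = field
--                 break
--
--     return mapping
-- ===== SOURCE B (Python) =====
-- from typing import List, Dict
--
-- # Flat priority table: keywords in A's field/keyword iteration order.
-- _KEYWORD_TO_FIELD = [
--     ('address', 'property_address'), ('location', 'property_address'),
--     ('street', 'property_address'), ('property location', 'property_address'),
--     ('owner', 'owner_name'), ('name', 'owner_name'), ('taxpayer', 'owner_name'),
--     ('value', 'property_value'), ('assessment', 'property_value'),
--     ('assessed', 'property_value'), ('appraised', 'property_value'),
--     ('market value', 'property_value'),
--     ('sqft', 'square_footage'), ('sq ft', 'square_footage'),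
--     ('square', 'square_footage'), ('footage', 'square_footage'),
--     ('area', 'square_footage'), ('size', 'square_footage'),
--     ('parcel', 'parcel_id'), ('id', 'parcel_id'), ('account', 'parcel_id'),
--     ('number', 'parcel_id'), ('pcn', 'parcel_id'),
--     ('sale', 'sale_price'), ('sold', 'sale_price'), ('price', 'sale_price'),
--     ('amount', 'sale_price'),
--     ('date', 'sale_date'), ('sold date', 'sale_date'), ('sale date', 'sale_date'),
--     ('year built', 'year_built'), ('built', 'year_built'),
--     ('construction', 'year_built'),
--     ('type', 'property_type'), ('use', 'property_type'),
--     ('classification', 'property_type'),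
--     ('city', 'municipality'), ('municipality', 'municipality'),
--     ('jurisdiction', 'municipality'),
--     ('lot', 'lot_size'), ('land', 'lot_size'), ('acreage', 'lot_size'),
--     ('bed', 'bedrooms'), ('br', 'bedrooms'), ('bedroom', 'bedrooms'),
--     ('bath', 'bathrooms'), ('bathroom', 'bathrooms'), ('ba', 'bathrooms'),
--     ('zone', 'zoning'), ('zoning', 'zoning'),
-- ]
--
-- # Hash index: keyword -> its priority rank (keywords are pairwise distinct).
-- _KEYWORD_RANK = {kw: i for i, (kw, _f) in enumerate(_KEYWORD_TO_FIELD)}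
--
-- def _create_column_mapping(headers: List[str]) -> Dict[int, str]:
--     """Multi-pattern matching by substring hashing: instead of testing each
--     keyword with 'in', enumerate every nonempty substring of the lowered header
--     and look it up in the keyword->rank hash; the lowest rank found wins."""
--     mapping = {}
--     for col, header in enumerate(headers):
--         low = header.lower()
--         n = len(low)
--         best = None
--         for j in range(n):
--             for end in range(j + 1, n + 1):
--                 r = _KEYWORD_RANK.get(low[j:end])
--                 if r is not None and (best is None or r < best):
--                     best = r
--         if best is not None:
--             mapping[col] = _KEYWORD_TO_FIELD[best][1]
--     return mapping
-- ===== Notes on version B (the rewrite author's own statement) =====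
-- stated objective: alternative
-- what changed: Replaces A's per-header scan of the keyword table with 'in' substring tests by multi-pattern matching via substring hashing: B enumerates every nonempty substring of the lowered header, looks it up in a precomputed keyword->priority-rank dict, and keeps the minimum rank, whose field is the answer.
import Mathlib
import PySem

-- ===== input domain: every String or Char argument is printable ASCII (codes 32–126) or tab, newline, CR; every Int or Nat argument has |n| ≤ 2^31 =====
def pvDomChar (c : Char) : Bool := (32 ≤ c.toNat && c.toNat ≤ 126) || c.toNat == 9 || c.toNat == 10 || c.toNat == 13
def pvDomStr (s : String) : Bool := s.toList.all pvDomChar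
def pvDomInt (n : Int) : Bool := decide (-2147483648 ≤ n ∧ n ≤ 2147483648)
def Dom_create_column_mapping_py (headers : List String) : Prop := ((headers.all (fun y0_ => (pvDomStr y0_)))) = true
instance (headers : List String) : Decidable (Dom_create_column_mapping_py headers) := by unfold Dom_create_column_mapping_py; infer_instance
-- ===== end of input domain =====

-- B replaces A's per-header keyword scan with 'in' tests by substring hashing: it enumerates every
-- nonempty substring of the lowered header, looks it up in a keyword->priority-rank dict, and keeps
-- the minimum rank found (objective: alternative algorithm, similar cost).


-- ===== PORT A =====
def pvFieldKeywords : List (String × List String) := [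
  ("property_address", ["address", "location", "street", "property location"]),
  ("owner_name", ["owner", "name", "taxpayer"]),
  ("property_value", ["value", "assessment", "assessed", "appraised", "market value"]),
  ("square_footage", ["sqft", "sq ft", "square", "footage", "area", "size"]),
  ("parcel_id", ["parcel", "id", "account", "number", "pcn"]),
  ("sale_price", ["sale", "sold", "price", "amount"]),
  ("sale_date", ["date", "sold date", "sale date"]),
  ("year_built", ["year built", "built", "construction"]),
  ("property_type", ["type", "use", "classification"]),
  ("municipality", ["city", "municipality", "jurisdiction"]),
  ("lot_size", ["lot", "land", "acreage"]),
  ("bedrooms", ["bed", "br", "bedroom"]),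
  ("bathrooms", ["bath", "bathroom", "ba"]),
  ("zoning", ["zone", "zoning"])]

-- the inner 'for field, keywords in field_keywords.items(): if any(...): mapping[col_idx] = field; break'
def pvInnerA (header_lower : String) (mapping : PySem.Dict Int String) (col_idx : Int) :
    List (String × List String) → PySem.Dict Int String
  | [] => mapping
  | (field, keywords) :: rest =>
    if keywords.any (fun keyword => PySem.Str.isIn keyword header_lower)
    then mapping.insert col_idx field
    else pvInnerA header_lower mapping col_idx rest

def create_column_mapping_py (headers : List String) : List (Int × String) :=
  ((PySem.List.enumerate headers 0).foldl
    (fun mapping p => pvInnerA (PySem.Str.lower p.2) mapping p.1 pvFieldKeywords)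
    PySem.Dict.empty).items

-- ===== PORT B =====
-- _KEYWORD_TO_FIELD: flat priority table
def pvKeywordToField : List (String × String) := [
  ("address", "property_address"), ("location", "property_address"),
  ("street", "property_address"), ("property location", "property_address"),
  ("owner", "owner_name"), ("name", "owner_name"), ("taxpayer", "owner_name"),
  ("value", "property_value"), ("assessment", "property_value"),
  ("assessed", "property_value"), ("appraised", "property_value"),
  ("market value", "property_value"),
  ("sqft", "square_footage"), ("sq ft", "square_footage"),
  ("square", "square_footage"), ("footage", "square_footage"),
  ("area", "square_footage"), ("size", "square_footage"),
  ("parcel", "parcel_id"), ("id", "parcel_id"), ("account", "parcel_id"),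
  ("number", "parcel_id"), ("pcn", "parcel_id"),
  ("sale", "sale_price"), ("sold", "sale_price"), ("price", "sale_price"),
  ("amount", "sale_price"),
  ("date", "sale_date"), ("sold date", "sale_date"), ("sale date", "sale_date"),
  ("year built", "year_built"), ("built", "year_built"),
  ("construction", "year_built"),
  ("type", "property_type"), ("use", "property_type"),
  ("classification", "property_type"),
  ("city", "municipality"), ("municipality", "municipality"),
  ("jurisdiction", "municipality"),
  ("lot", "lot_size"), ("land", "lot_size"), ("acreage", "lot_size"),
  ("bed", "bedrooms"), ("br", "bedrooms"), ("bedroom", "bedrooms"),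
  ("bath", "bathrooms"), ("bathroom", "bathrooms"), ("ba", "bathrooms"),
  ("zone", "zoning"), ("zoning", "zoning")]

-- _KEYWORD_RANK = {kw: i for i, (kw, _f) in enumerate(_KEYWORD_TO_FIELD)}
def pvKeywordRank : PySem.Dict String Int :=
  (PySem.List.enumerate pvKeywordToField 0).foldl
    (fun d p => d.insert p.2.1 p.1) PySem.Dict.empty

-- the two range loops over all nonempty substrings low[j:end], keeping the minimum rank found
def pvBestLoop (low : String) : Option Int :=
  (PySem.List.pyRange 0 (PySem.Str.len low) 1).foldl
    (fun best j =>
      (PySem.List.pyRange (j + 1) (PySem.Str.len low + 1) 1).foldl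
        (fun best e =>
          match pvKeywordRank.get? (PySem.Str.slice low (some j) (some e)) with
          | some r =>
            match best with
            | none => some r
            | some b => if r < b then some r else best
          | none => best)
        best)
    none

def create_column_mapping_py_alt (headers : List String) : List (Int × String) :=
  ((PySem.List.enumerate headers 0).foldl
    (fun mapping p =>
      match pvBestLoop (PySem.Str.lower p.2) with
      | some best => mapping.insert p.1 (PySem.List.pyGetD pvKeywordToField best ("", "")).2
      | none => mapping)
    PySem.Dict.empty).items

-- ===== PRECONDITION & SPEC =====
def Spec_create_column_mapping_py (headers : List String) (out : List (Int × String)) : Prop := out = create_column_mapping_py_alt headers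
instance (headers : List String) (out : List (Int × String)) : Decidable (Spec_create_column_mapping_py headers out) := by unfold Spec_create_column_mapping_py; infer_instance

-- ===== CLAIM (what is proved, stated in full; the proofs are below) =====
def Claim_equal_create_column_mapping_py : Prop := ∀ (headers : List String), Dom_create_column_mapping_py headers → Spec_create_column_mapping_py headers (create_column_mapping_py headers)

-- ===== LEMMAS AND PROOFS =====

-- first-match over a flat (keyword, field) list: normal form shared by both reductions
def pvMatchGo (low : String) : List (String × String) → Option String
  | [] => none
  | (keyword, field) :: rest =>
    if PySem.Str.isIn keyword low then some field else pvMatchGo low rest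

-- the min-accumulator step of B's inner loop, named for the proofs
def pvStep (best : Option Int) (r : Int) : Option Int :=
  match best with
  | none => some r
  | some b => if r < b then some r else best

-- the ranks B's double loop encounters, as one flat list
def pvHits (low : String) : List Int :=
  (((PySem.List.pyRange 0 (PySem.Str.len low) 1).flatMap (fun j =>
      (PySem.List.pyRange (j + 1) (PySem.Str.len low + 1) 1).map (fun e => (j, e)))).filterMap
    (fun p => pvKeywordRank.get? (PySem.Str.slice low (some p.1) (some p.2))))

theorem pv_if_or {α : Type} (a b : Bool) (x y : α) :
    (if a = true then x else if b = true then x else y) = if (a || b) = true then x else y := by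
  cases a <;> cases b <;> simp

-- flattening A's dict-of-keyword-lists in field order gives exactly B's flat priority table
theorem pv_flat_eq :
    pvFieldKeywords.flatMap (fun p => p.2.map (fun kw => (kw, p.1))) = pvKeywordToField := by
  rfl

theorem pvMatchGo_block (low f : String) (kws : List String) (t : List (String × String)) :
    pvMatchGo low (kws.map (fun kw => (kw, f)) ++ t)
      = if kws.any (fun keyword => PySem.Str.isIn keyword low) then some f
        else pvMatchGo low t := by
  induction kws with
  | nil => simp
  | cons k ks ih =>
    simp only [List.map_cons, List.cons_append, pvMatchGo, List.any_cons, ih]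
    rw [pv_if_or]
    rfl

-- A's inner break-loop over any nested field list equals first-match over its flattening
theorem pvInnerA_eq_matchGo (low : String) (d : PySem.Dict Int String) (ci : Int)
    (fields : List (String × List String)) :
    pvInnerA low d ci fields
      = match pvMatchGo low (fields.flatMap (fun p => p.2.map (fun kw => (kw, p.1)))) with
        | some f => d.insert ci f
        | none => d := by
  induction fields with
  | nil => simp [pvInnerA, pvMatchGo]
  | cons p rest ih =>
    obtain ⟨f, kws⟩ := p
    simp only [pvInnerA, List.flatMap_cons, pvMatchGo_block, ih]
    rcases Bool.eq_false_or_eq_true (kws.any (fun keyword => PySem.Str.isIn keyword low)) with h | h <;>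
      rw [h] <;> simp

-- first-match equals findIdx? of the keyword predicate
theorem pvMatchGo_eq_findIdx (low : String) (l : List (String × String)) :
    pvMatchGo low l
      = (l.findIdx? (fun p => PySem.Str.isIn p.1 low)).bind (fun i => l[i]?.map Prod.snd) := by
  induction l with
  | nil => rfl
  | cons p t ih =>
    obtain ⟨kw, f⟩ := p
    simp only [pvMatchGo, List.findIdx?_cons]
    cases hb : PySem.Str.isIn kw low with
    | true => simp
    | false =>
      simp only [Bool.false_eq_true, if_false, ih]
      cases List.findIdx? (fun p => PySem.Str.isIn p.1 low) t <;> simp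

-- generic: a foldl over a filterMap absorbs the lookup into the step
theorem pv_foldl_filterMap {α : Type} (l : List α) (g : α → Option Int)
    (f : Option Int → Int → Option Int) :
    ∀ b : Option Int, (l.filterMap g).foldl f b
      = l.foldl (fun b a => match g a with | some r => f b r | none => b) b := by
  induction l with
  | nil => intro b; rfl
  | cons x t ih =>
    intro b
    cases hg : g x with
    | none => simp only [List.filterMap_cons, hg, List.foldl_cons]; exact ih b
    | some r => simp only [List.filterMap_cons, hg, List.foldl_cons]; exact ih (f b r)

-- B's nested loops compute the min-fold over pvHits
theorem pvBestLoop_eq_fold (low : String) :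
    pvBestLoop low = (pvHits low).foldl pvStep none := by
  unfold pvBestLoop pvHits
  rw [pv_foldl_filterMap, List.foldl_flatMap]
  simp only [List.foldl_map]
  apply PySem.List.foldl_congr_mem
  intro acc j _
  apply PySem.List.foldl_congr_mem
  intro acc2 e _
  cases pvKeywordRank.get? (PySem.Str.slice low (some j) (some e)) <;> rfl

-- pvStep never discards a some accumulator
theorem pv_fold_step_ne_none (hits : List Int) :
    ∀ (b : Option Int), hits.foldl pvStep b = none → b = none ∧ hits = [] := by
  induction hits with
  | nil => intro b h; exact ⟨h, rfl⟩
  | cons x t ih =>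
    intro b h
    rcases ih (pvStep b x) h with ⟨hstep, -⟩
    exfalso
    cases b <;> simp [pvStep] at hstep
    split at hstep <;> simp at hstep

-- the min-fold returns a minimal member
theorem pv_fold_step_spec (hits : List Int) :
    ∀ (b : Option Int) (v : Int), hits.foldl pvStep b = some v →
      (b = some v ∨ v ∈ hits) ∧ (∀ x, b = some x → v ≤ x) ∧ (∀ x ∈ hits, v ≤ x) := by
  induction hits with
  | nil =>
    intro b v h
    simp only [List.foldl_nil] at h
    refine ⟨Or.inl h, fun x hx => ?_, fun x hx => by simp at hx⟩
    rw [h] at hx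
    have := Option.some.inj hx
    omega
  | cons a t ih =>
    intro b v h
    simp only [List.foldl_cons] at h
    rcases ih (pvStep b a) v h with ⟨h1, h2, h3⟩
    cases b with
    | none =>
      have hs : pvStep none a = some a := rfl
      have hva : v ≤ a := h2 a hs
      refine ⟨Or.inr ?_, fun x hx => by simp at hx, fun x hx => ?_⟩
      · rcases h1 with h1 | h1
        · rw [hs] at h1; simp at h1; simp [h1]
        · exact List.mem_cons_of_mem _ h1
      · rcases List.mem_cons.mp hx with rfl | hx
        · exact hva
        · exact h3 x hx
    | some x0 =>
      by_cases hlt : a < x0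
      · have hs : pvStep (some x0) a = some a := by simp [pvStep, hlt]
        rw [hs] at h1 h2
        have hva : v ≤ a := h2 a rfl
        refine ⟨Or.inr ?_, fun x hx => ?_, fun x hx => ?_⟩
        · rcases h1 with h1 | h1
          · simp at h1; simp [h1]
          · exact List.mem_cons_of_mem _ h1
        · have := Option.some.inj hx; omega
        · rcases List.mem_cons.mp hx with rfl | hx
          · exact hva
          · exact h3 x hx
      · have hs : pvStep (some x0) a = some x0 := by simp [pvStep, hlt]
        rw [hs] at h1 h2
        have hvx0 : v ≤ x0 := h2 x0 rfl
        refine ⟨?_, fun x hx => ?_, fun x hx => ?_⟩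
        · rcases h1 with h1 | h1
          · exact Or.inl h1
          · exact Or.inr (List.mem_cons_of_mem _ h1)
        · have := Option.some.inj hx; omega
        · rcases List.mem_cons.mp hx with rfl | hx
          · omega
          · exact h3 x hx

-- the rank dict's items are exactly the (keyword, rank) pairs of the enumeration
theorem pv_rank_items :
    pvKeywordRank.items
      = (PySem.List.enumerate pvKeywordToField 0).map (fun p => (p.2.1, p.1)) := by
  have h := PySem.Dict.items_foldl_insert_fresh (PySem.List.enumerate pvKeywordToField 0)
      (fun p => p.2.1) (fun p => p.1) PySem.Dict.empty
      (fun a _ => PySem.Dict.contains_empty _) (by decide)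
  unfold pvKeywordRank
  simpa using h

theorem pv_rank_keys_nodup : pvKeywordRank.keys.Nodup := by
  have h : pvKeywordRank.keys = pvKeywordRank.items.map Prod.fst := by
    simp only [PySem.Dict.keys]
  rw [h, pv_rank_items]
  decide

-- no table keyword is the empty string
theorem pv_kw_ne_nil : ∀ p ∈ pvKeywordToField, p.1.toList ≠ [] := by decide

-- a rank is hit by the substring scan of `low` iff its keyword occurs in `low`
theorem pv_mem_hits (low : String) (r : Int) :
    r ∈ pvHits low
      ↔ ∃ q ∈ PySem.List.enumerate pvKeywordToField 0,
          q.1 = r ∧ PySem.Str.isIn q.2.1 low = true := by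
  have hlen : PySem.Str.len low = (low.toList.length : Int) := by simp [pysem]
  unfold pvHits
  constructor
  · intro hr
    rcases List.mem_filterMap.mp hr with ⟨p, hmem, hget⟩
    rcases List.mem_flatMap.mp hmem with ⟨j, hj, hp⟩
    rcases List.mem_map.mp hp with ⟨e, he, rfl⟩
    rw [PySem.List.mem_pyRange_one] at hj he
    rcases hj with ⟨hj0, hjn⟩
    rcases he with ⟨hej, hen⟩
    have hitems := (PySem.Dict.get?_eq_some_iff_mem_items _ _ _ pv_rank_keys_nodup).mp hget
    rw [pv_rank_items] at hitems
    rcases List.mem_map.mp hitems with ⟨q, hq, hqe⟩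
    refine ⟨q, hq, ?_, ?_⟩
    · have := congrArg Prod.snd hqe; simpa using this
    · have hk : q.2.1 = PySem.Str.slice low (some j) (some e) := by
        have := congrArg Prod.fst hqe; simpa using this
      rw [hk, PySem.Str.isIn_iff_infix, PySem.Str.toList_slice, PySem.Chars.slice_eq_listSlice]
      have hj' : j = ((j.toNat : Nat) : Int) := (Int.toNat_of_nonneg hj0).symm
      have he' : e = ((e.toNat : Nat) : Int) := (Int.toNat_of_nonneg (by omega)).symm
      rw [hj', he', PySem.List.slice_natCast]
      exact ((List.take_prefix _ _).isInfix.trans (List.drop_suffix _ _).isInfix)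
  · rintro ⟨q, hq, hqr, hin⟩
    rcases (PySem.List.mem_enumerate_iff _ _ _).mp hq with ⟨k, hk, rfl⟩
    have hinf := (PySem.Str.isIn_iff_infix _ _).mp hin
    rcases hinf with ⟨t1, t2, hsp⟩
    have hne : (pvKeywordToField[k].1).toList ≠ [] :=
      pv_kw_ne_nil _ (List.getElem_mem hk)
    have hL : 1 ≤ (pvKeywordToField[k].1).toList.length := by
      cases hcl : (pvKeywordToField[k].1).toList with
      | nil => exact absurd hcl hne
      | cons a b => simp
    have hlow : low.toList.length
        = t1.length + (pvKeywordToField[k].1).toList.length + t2.length := by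
      have h := congrArg List.length hsp
      simp only [List.length_append] at h
      omega
    have hslice : PySem.Str.slice low (some ((t1.length : Nat) : Int))
        (some (((t1.length + (pvKeywordToField[k].1).toList.length : Nat) : Nat) : Int))
        = pvKeywordToField[k].1 := by
      apply String.toList_inj.mp
      rw [PySem.Str.toList_slice, PySem.Chars.slice_eq_listSlice, PySem.List.slice_natCast,
        ← hsp]
      simp
    have hget : pvKeywordRank.get? (PySem.Str.slice low (some ((t1.length : Nat) : Int))
        (some (((t1.length + (pvKeywordToField[k].1).toList.length : Nat) : Nat) : Int)))
        = some (0 + (k : Int)) := by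
      rw [hslice]
      apply PySem.Dict.get?_of_mem_items _ _ pv_rank_keys_nodup
      rw [pv_rank_items]
      exact List.mem_map.mpr ⟨(0 + (k : Int), pvKeywordToField[k]),
        (PySem.List.mem_enumerate_iff _ _ _).mpr ⟨k, hk, rfl⟩, rfl⟩
    apply List.mem_filterMap.mpr
    refine ⟨(((t1.length : Nat) : Int),
      (((t1.length + (pvKeywordToField[k].1).toList.length : Nat) : Nat) : Int)), ?_, ?_⟩
    · apply List.mem_flatMap.mpr
      refine ⟨((t1.length : Nat) : Int), ?_, ?_⟩
      · rw [PySem.List.mem_pyRange_one, hlen]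
        constructor
        · omega
        · omega
      · apply List.mem_map.mpr
        refine ⟨(((t1.length + (pvKeywordToField[k].1).toList.length : Nat) : Nat) : Int), ?_, rfl⟩
        rw [PySem.List.mem_pyRange_one, hlen]
        constructor
        · push_cast; omega
        · push_cast; omega
    · rw [hget, ← hqr]

-- per header: B's substring-hash minimum names the same field as A's first match
theorem pv_header (low : String) :
    (pvBestLoop low).map (fun b => (PySem.List.pyGetD pvKeywordToField b ("", "")).2)
      = pvMatchGo low pvKeywordToField := by
  rw [pvBestLoop_eq_fold, pvMatchGo_eq_findIdx]
  cases hidx : pvKeywordToField.findIdx? (fun p => PySem.Str.isIn p.1 low) with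
  | none =>
    have hnil : pvHits low = [] := by
      cases hh : pvHits low with
      | nil => rfl
      | cons a t =>
        exfalso
        have ha : a ∈ pvHits low := by rw [hh]; exact List.mem_cons_self ..
        rcases (pv_mem_hits low a).mp ha with ⟨q, hq, -, hin⟩
        rcases (PySem.List.mem_enumerate_iff _ _ _).mp hq with ⟨k, hk, rfl⟩
        have hin' : PySem.Str.isIn pvKeywordToField[k].1 low = true := hin
        have hfalse := List.findIdx?_eq_none_iff.mp hidx _ (List.getElem_mem hk)
        rw [hfalse] at hin'
        cases hin'
    rw [hnil]
    rfl
  | some m =>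
    rcases List.findIdx?_eq_some_iff_getElem.mp hidx with ⟨hm, hpm, hmin⟩
    have hmem : (m : Int) ∈ pvHits low :=
      (pv_mem_hits low (m : Int)).mpr ⟨(0 + (m : Int), pvKeywordToField[m]),
        (PySem.List.mem_enumerate_iff _ _ _).mpr ⟨m, hm, rfl⟩, by simp, by simpa using hpm⟩
    cases hfold : (pvHits low).foldl pvStep none with
    | none =>
      rcases pv_fold_step_ne_none _ _ hfold with ⟨-, hnil⟩
      rw [hnil] at hmem
      cases hmem
    | some v =>
      rcases pv_fold_step_spec _ _ _ hfold with ⟨h1, -, h3⟩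
      have hv_mem : v ∈ pvHits low := by
        rcases h1 with h1 | h1
        · cases h1
        · exact h1
      rcases (pv_mem_hits low v).mp hv_mem with ⟨q, hq, hqr, hin⟩
      rcases (PySem.List.mem_enumerate_iff _ _ _).mp hq with ⟨k, hk, rfl⟩
      have hin' : PySem.Str.isIn pvKeywordToField[k].1 low = true := hin
      have hmk : m ≤ k := by
        rcases Nat.lt_or_ge k m with hlt | hge
        · exfalso
          have hfalse := hmin k hlt
          simp only [Bool.not_eq_true] at hfalse
          rw [hfalse] at hin'
          cases hin'
        · exact hge
      have hveq : v = (m : Int) := by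
        have hvk : (0 : Int) + (k : Int) = v := hqr
        have hvm : v ≤ (m : Int) := h3 _ hmem
        omega
      rw [hveq]
      have hG : PySem.List.pyGetD pvKeywordToField ((m : Nat) : Int) ("", "")
          = pvKeywordToField[m] := by
        rw [PySem.List.pyGetD_natCast]
        exact List.getD_eq_getElem _ _ hm
      simp [hG, List.getElem?_eq_getElem hm]

-- ===== VERDICT (by name: the statement is the Claim_ definition above) =====
theorem create_column_mapping_py_spec : Claim_equal_create_column_mapping_py := by
  intro headers _
  unfold Spec_create_column_mapping_py create_column_mapping_py create_column_mapping_py_alt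
  have hfun : (fun (mapping : PySem.Dict Int String) (p : Int × String) =>
        pvInnerA (PySem.Str.lower p.2) mapping p.1 pvFieldKeywords)
      = (fun mapping p =>
        match pvBestLoop (PySem.Str.lower p.2) with
        | some best => mapping.insert p.1 (PySem.List.pyGetD pvKeywordToField best ("", "")).2
        | none => mapping) := by
    funext mapping p
    rw [pvInnerA_eq_matchGo, pv_flat_eq, ← pv_header (PySem.Str.lower p.2)]
    cases pvBestLoop (PySem.Str.lower p.2) <;> rfl
  rw [hfun]
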